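-- pv_equiv track=rewrite | github.com/VMoza/consulting_datapipelining | consolidateEmails.py | standardize_headers
-- ===== SOURCE A (Python) =====
-- HEADER_MAP = {
--     "name": "NAME",
--     "first": "FIRST",
--     "position": "POSITION",
--     "role" : "POSITION",
--     "email address": "EMAIL",
--     "email": "EMAIL",
--     "e-mail": "EMAIL",
--     "company" : "COMPANY",
--     "company name": "COMPANY",
--     "merge status" : "Merge status"
-- }
--
-- def standardize_headers(data):
--     """Standardize headers based on mapping and handle missing fields."""
--     for record in data:
--         standardized_record = {}
--         for old_key, new_key in HEADER_MAP.items():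
--             if old_key in record:
--                 # Check if we're about to overwrite an existing field.
--                 # If so, merge the values.
--                 if new_key in standardized_record:
--                     standardized_record[new_key] = f"{standardized_record[new_key]} {record[old_key]}"
--                 else:
--                     standardized_record[new_key] = record[old_key]
--
--         # Fill missing keys with default values
--         for key in HEADER_MAP.values():
--             standardized_record.setdefault(key, None)
--
--         # Replace the original record with the standardized one
--         record.clear()
--         record.update(standardized_record)
--
--     return data
-- ===== SOURCE B (Python) =====
-- _TARGETS = [
--     ("NAME", ["name"]),
--     ("FIRST", ["first"]),
--     ("POSITION", ["position", "role"]),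
--     ("EMAIL", ["email address", "email", "e-mail"]),
--     ("COMPANY", ["company", "company name"]),
--     ("Merge status", ["merge status"]),
-- ]
--
-- def standardize_headers(data):
--     """Standardize headers via a reverse index: for each target header gather the
--     present source values in one pass, then rebuild the record (present first,
--     then the missing targets with None), instead of dict-overwrite + setdefault."""
--     for record in data:
--         present = []
--         missing = []
--         for target, sources in _TARGETS:
--             vals = [record[s] for s in sources if s in record]
--             if vals:
--                 v = vals[0]
--                 for extra in vals[1:]:
--                     v = f"{v} {extra}"
--                 present.append((target, v))
--             else:
--                 missing.append(target)
--         record.clear()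
--         record.update(present)
--         for t in missing:
--             record[t] = None
--     return data
-- ===== Notes on version B (the rewrite author's own statement) =====
-- stated objective: alternative
-- what changed: B replaces A's dict-overwrite-then-setdefault passes with a precomputed reverse index (target header -> ordered source keys): one pass over the targets gathers each target's present source values, merging them directly and splitting the record into present/missing parts, then rebuilds the record as present ++ missing.
import Mathlib
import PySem

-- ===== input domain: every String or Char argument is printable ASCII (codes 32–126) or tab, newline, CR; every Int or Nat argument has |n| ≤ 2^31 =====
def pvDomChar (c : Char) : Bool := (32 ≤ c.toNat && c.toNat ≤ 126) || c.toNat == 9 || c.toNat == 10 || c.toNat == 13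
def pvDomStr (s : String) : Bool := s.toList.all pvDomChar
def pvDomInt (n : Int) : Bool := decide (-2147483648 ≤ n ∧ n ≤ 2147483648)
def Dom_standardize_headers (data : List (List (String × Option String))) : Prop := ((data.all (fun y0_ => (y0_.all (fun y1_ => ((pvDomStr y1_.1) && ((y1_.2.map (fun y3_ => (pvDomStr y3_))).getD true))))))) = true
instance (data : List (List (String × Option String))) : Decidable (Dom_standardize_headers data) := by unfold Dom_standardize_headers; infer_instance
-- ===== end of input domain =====

-- B replaces A's dict-overwrite + setdefault passes with a reverse index (target -> ordered
-- source keys), gathering each target's present values in one pass; same cost, different structure.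
-- Both Pythons mutate the records in place and return the same list object; the equivalence
-- proved here is about the RETURN value (both ports rebuild the records functionally).

-- ===== PORT A =====
-- f"{x}" rendering of a record value (Option String): Python prints None as "None" (exact on this type)
def pyShowOptStr : Option String → String
  | some s => s
  | none => "None"

-- first-match lookup: 'k in record' / 'record[k]' on a Python dict rendered as an association list
def rget (record : List (String × Option String)) (k : String) : Option (Option String) :=
  (record.find? (fun p => p.1 == k)).map (·.2)

def HEADER_MAP : PySem.Dict String String := PySem.Dict.mk
  [("name", "NAME"), ("first", "FIRST"), ("position", "POSITION"), ("role", "POSITION"),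
   ("email address", "EMAIL"), ("email", "EMAIL"), ("e-mail", "EMAIL"),
   ("company", "COMPANY"), ("company name", "COMPANY"), ("merge status", "Merge status")]

-- body of A's 'for old_key, new_key in HEADER_MAP.items()' loop
def stepA (record : List (String × Option String)) (sr : PySem.Dict String (Option String))
    (kv : String × String) : PySem.Dict String (Option String) :=
  match rget record kv.1 with                                -- if old_key in record: (then record[old_key])
  | none => sr
  | some v =>
      match sr.get? kv.2 with                                -- if new_key in standardized_record
      | some cur => sr.insert kv.2 (some (pyShowOptStr cur ++ " " ++ pyShowOptStr v))
      | none => sr.insert kv.2 v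

-- one record of A: build standardized_record, then the setdefault pass; clear+update = its items
def stdRecA (record : List (String × Option String)) : List (String × Option String) :=
  let sr := HEADER_MAP.items.foldl (stepA record) PySem.Dict.empty
  let sr := HEADER_MAP.values.foldl (fun d k => d.setdefault k none) sr
  sr.items

def standardize_headers (data : List (List (String × Option String))) : List (List (String × Option String)) :=
  data.map stdRecA

-- ===== PORT B =====
def TARGETS : List (String × List String) :=
  [("NAME", ["name"]), ("FIRST", ["first"]), ("POSITION", ["position", "role"]),
   ("EMAIL", ["email address", "email", "e-mail"]), ("COMPANY", ["company", "company name"]),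
   ("Merge status", ["merge status"])]

-- Source B: v = vals[0]; for extra in vals[1:]: v = f"{v} {extra}"
def mergeVals (v : Option String) (rest : List (Option String)) : Option String :=
  rest.foldl (fun cur extra => some (pyShowOptStr cur ++ " " ++ pyShowOptStr extra)) v

-- one record of B: split the targets into present (with their gathered value) and missing
def stdRecB (record : List (String × Option String)) : List (String × Option String) :=
  let pm := TARGETS.foldl
    (fun (acc : List (String × Option String) × List String) ts =>
      match ts.2.filterMap (fun s => rget record s) with      -- [record[s] for s in sources if s in record]
      | [] => (acc.1, acc.2 ++ [ts.1])
      | v :: rest => (acc.1 ++ [(ts.1, mergeVals v rest)], acc.2))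
    ([], [])
  pm.1 ++ pm.2.map (fun t => (t, (none : Option String)))     -- record.clear(); update(present); missing ← None

def standardize_headers_alt (data : List (List (String × Option String))) : List (List (String × Option String)) :=
  data.map stdRecB

-- ===== PRECONDITION & SPEC =====
def Spec_standardize_headers (data : List (List (String × Option String))) (out : List (List (String × Option String))) : Prop := out = standardize_headers_alt data
instance (data : List (List (String × Option String))) (out : List (List (String × Option String))) : Decidable (Spec_standardize_headers data out) := by unfold Spec_standardize_headers; infer_instance

-- ===== CLAIM (what is proved, stated in full; the proofs are below) =====
def Claim_equal_standardize_headers : Prop := ∀ (data : List (List (String × Option String))), Dom_standardize_headers data → Spec_standardize_headers data (standardize_headers data)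

-- ===== LEMMAS AND PROOFS =====

-- the merged value a block (one target, its source list) contributes, if any
def blockVal (record : List (String × Option String)) (srcs : List String) : Option (Option String) :=
  match srcs.filterMap (fun s => rget record s) with
  | [] => none
  | v :: rest => some (mergeVals v rest)

-- A's inner loop over one block, after the first insert of the target: later hits merge in place
theorem foldA_block_inserted (r : List (String × Option String)) (srcs : List String)
    (d : PySem.Dict String (Option String)) (t : String) (v : Option String) :
    (srcs.map (fun s => (s, t))).foldl (stepA r) (d.insert t v)
      = d.insert t (mergeVals v (srcs.filterMap (fun s => rget r s))) := by
  induction srcs generalizing v with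
  | nil => simp [mergeVals]
  | cons s rest ih =>
    simp only [List.map_cons, List.foldl_cons, List.filterMap_cons, stepA]
    cases hs : rget r s with
    | none => exact ih v
    | some w =>
      dsimp only
      rw [PySem.Dict.get?_insert_self]
      dsimp only
      rw [PySem.Dict.insert_insert_self]
      rw [ih (some (pyShowOptStr v ++ " " ++ pyShowOptStr w))]
      simp [mergeVals]

-- A's inner loop over one whole block, starting with the target absent
theorem foldA_block (r : List (String × Option String)) (srcs : List String)
    (d : PySem.Dict String (Option String)) (t : String) (h : d.contains t = false) :
    (srcs.map (fun s => (s, t))).foldl (stepA r) d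
      = match blockVal r srcs with
        | none => d
        | some v => d.insert t v := by
  induction srcs with
  | nil => simp [blockVal]
  | cons s rest ih =>
    simp only [List.map_cons, List.foldl_cons, stepA, blockVal, List.filterMap_cons]
    cases hs : rget r s with
    | none =>
      have := ih
      simp only [blockVal] at this
      exact this
    | some w =>
      have hg : d.get? t = none := by
        rw [PySem.Dict.get?_eq_none_iff_contains, h]
      rw [hg]
      exact foldA_block_inserted r rest d t w

-- A's main loop, seen block by block (the HEADER_MAP blocks per target are contiguous)
theorem foldA_blocks (r : List (String × Option String)) (blocks : List (String × List String))
    (d : PySem.Dict String (Option String))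
    (hfresh : ∀ b ∈ blocks, d.contains b.1 = false)
    (hnd : (blocks.map (·.1)).Nodup) :
    ((blocks.flatMap (fun b => b.2.map (fun s => (s, b.1)))).foldl (stepA r) d).items
      = d.items ++ blocks.filterMap (fun b => (blockVal r b.2).map (fun v => (b.1, v))) := by
  induction blocks generalizing d with
  | nil => simp
  | cons b bs ih =>
    simp only [List.flatMap_cons, List.foldl_append, List.filterMap_cons]
    have hb : d.contains b.1 = false := hfresh b (by simp)
    rw [foldA_block r b.2 d b.1 hb]
    simp only [List.map_cons, List.nodup_cons] at hnd
    cases hv : blockVal r b.2 with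
    | none =>
      simp only [Option.map_none]
      rw [ih d (fun b' hb' => hfresh b' (by simp [hb'])) hnd.2]
    | some v =>
      simp only [Option.map_some]
      rw [ih (d.insert b.1 v) ?_ hnd.2]
      · rw [PySem.Dict.items_insert_of_not_contains _ _ hb]
        simp
      · intro b' hb'
        rw [PySem.Dict.contains_insert]
        have hne : b'.1 ≠ b.1 := by
          intro he
          exact hnd.1 (he ▸ List.mem_map_of_mem hb')
        simp [hne, hfresh b' (by simp [hb'])]

-- a setdefault repeated on the same key is a no-op
theorem setdefault_setdefault (d : PySem.Dict String (Option String)) (k : String) (v : Option String) :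
    (d.setdefault k v).setdefault k v = d.setdefault k v := by
  apply PySem.Dict.setdefault_of_contains
  rw [PySem.Dict.contains_setdefault]
  simp

-- the setdefault pass over distinct keys appends exactly the missing ones, in order
theorem foldl_setdefault (ks : List String) (d : PySem.Dict String (Option String))
    (hnd : ks.Nodup) :
    (ks.foldl (fun d k => d.setdefault k (none : Option String)) d).items
      = d.items ++ (ks.filter (fun k => !d.contains k)).map (fun k => (k, (none : Option String))) := by
  induction ks generalizing d with
  | nil => simp
  | cons k ks ih =>
    simp only [List.foldl_cons, List.filter_cons]
    simp only [List.nodup_cons] at hnd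
    cases hc : d.contains k with
    | true =>
      rw [PySem.Dict.setdefault_of_contains _ _ hc]
      rw [ih d hnd.2]
      simp
    | false =>
      rw [PySem.Dict.setdefault_of_not_contains _ _ hc]
      rw [ih _ hnd.2]
      rw [PySem.Dict.items_insert_of_not_contains _ _ hc]
      have hfilter : ks.filter (fun k' => !(d.insert k (none : Option String)).contains k')
          = ks.filter (fun k' => !d.contains k') := by
        apply List.filter_congr
        intro k' hk'
        rw [PySem.Dict.contains_insert]
        have : (k' == k) = false := by
          simp only [beq_eq_false_iff_ne]
          intro he; exact hnd.1 (he ▸ hk')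
        simp [this]
      rw [hfilter]
      simp

-- B's fold over TARGETS, with explicit accumulators
theorem foldB_acc (r : List (String × Option String)) (ts : List (String × List String))
    (accP : List (String × Option String)) (accM : List String) :
    ts.foldl (fun (acc : List (String × Option String) × List String) ts =>
        match ts.2.filterMap (fun s => rget r s) with
        | [] => (acc.1, acc.2 ++ [ts.1])
        | v :: rest => (acc.1 ++ [(ts.1, mergeVals v rest)], acc.2)) (accP, accM)
      = (accP ++ ts.filterMap (fun b => (blockVal r b.2).map (fun v => (b.1, v))),
         accM ++ (ts.filter (fun b => (blockVal r b.2).isNone)).map (·.1)) := by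
  induction ts generalizing accP accM with
  | nil => simp
  | cons b bs ih =>
    simp only [List.foldl_cons]
    cases hv : b.2.filterMap (fun s => rget r s) with
    | nil =>
      dsimp only
      rw [ih]
      have hb : blockVal r b.2 = none := by simp [blockVal, hv]
      simp [hb]
    | cons v rest =>
      dsimp only
      rw [ih]
      have hb : blockVal r b.2 = some (mergeVals v rest) := by simp [blockVal, hv]
      simp [hb]

theorem stdRec_eq (r : List (String × Option String)) : stdRecA r = stdRecB r := by
  have hmap : HEADER_MAP.items = TARGETS.flatMap (fun b => b.2.map (fun s => (s, b.1))) := by decide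
  have hmain : (HEADER_MAP.items.foldl (stepA r) PySem.Dict.empty).items
      = TARGETS.filterMap (fun b => (blockVal r b.2).map (fun v => (b.1, v))) := by
    rw [hmap, foldA_blocks r TARGETS PySem.Dict.empty (by intro b _; rfl) (by decide)]
    simp [PySem.Dict.empty]
  unfold stdRecA stdRecB
  rw [foldB_acc r TARGETS [] []]
  simp only [List.nil_append]
  -- reduce the 10-key setdefault pass (duplicated values) to the 6 distinct targets
  have hvals : ∀ d : PySem.Dict String (Option String),
      HEADER_MAP.values.foldl (fun d k => d.setdefault k (none : Option String)) d
        = ["NAME", "FIRST", "POSITION", "EMAIL", "COMPANY", "Merge status"].foldl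
            (fun d k => d.setdefault k (none : Option String)) d := by
    intro d
    show List.foldl _ d ["NAME", "FIRST", "POSITION", "POSITION", "EMAIL", "EMAIL", "EMAIL", "COMPANY", "COMPANY", "Merge status"] = _
    simp only [List.foldl_cons, List.foldl_nil, setdefault_setdefault]
  rw [hvals, foldl_setdefault _ _ (by decide), hmain]
  -- the main-loop dict contains a target iff its block contributed a value
  have hcont : ∀ t : String,
      (HEADER_MAP.items.foldl (stepA r) PySem.Dict.empty).contains t
        = decide (t ∈ (TARGETS.filterMap (fun b => (blockVal r b.2).map (fun v => (b.1, v)))).map (·.1)) := by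
    intro t
    rw [PySem.Dict.contains_eq_decide_mem_keys]
    show decide (t ∈ (HEADER_MAP.items.foldl (stepA r) PySem.Dict.empty).items.map (·.1)) = _
    rw [hmain]
  -- finish by cases on which targets are present
  rcases h1 : blockVal r ["name"] with _ | v1 <;>
  rcases h2 : blockVal r ["first"] with _ | v2 <;>
  rcases h3 : blockVal r ["position", "role"] with _ | v3 <;>
  rcases h4 : blockVal r ["email address", "email", "e-mail"] with _ | v4 <;>
  rcases h5 : blockVal r ["company", "company name"] with _ | v5 <;>
  rcases h6 : blockVal r ["merge status"] with _ | v6 <;>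
  simp [TARGETS, hcont, h1, h2, h3, h4, h5, h6]

-- ===== VERDICT (by name: the statement is the Claim_ definition above) =====
theorem standardize_headers_spec : Claim_equal_standardize_headers := by
  intro data _
  show standardize_headers data = standardize_headers_alt data
  unfold standardize_headers standardize_headers_alt
  exact List.map_congr_left (fun r _ => stdRec_eq r)
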